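-- pv_equiv track=rewrite | github.com/kaitlynjanerouse/PolyphAI | Code/music.py | harmonies_to_zero
-- ===== SOURCE A (Python) =====
-- def harmonies_to_zero(song):
--     result = []
--     for i in range(len(song)):
--         if i % 5 == 2 or i % 5 == 3 or i % 5 == 4:
--             result.append(-1)
--         else:
--             result.append(song[i])
--     return result
-- ===== SOURCE B (Python) =====
-- def harmonies_to_zero(song):
--     result = []
--     for start in range(0, len(song), 5):
--         chunk = song[start:start+5]
--         result += chunk[:2]
--         result += [-1] * (len(chunk) - 2)
--     return result
-- ===== Notes on version B (the rewrite author's own statement) =====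
-- stated objective: alternative
-- what changed: B consumes the list in blocks of five via slicing (keep first two, emit -1 for the rest of the block) instead of testing i % 5 at every index with per-element indexing.
import Mathlib
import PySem

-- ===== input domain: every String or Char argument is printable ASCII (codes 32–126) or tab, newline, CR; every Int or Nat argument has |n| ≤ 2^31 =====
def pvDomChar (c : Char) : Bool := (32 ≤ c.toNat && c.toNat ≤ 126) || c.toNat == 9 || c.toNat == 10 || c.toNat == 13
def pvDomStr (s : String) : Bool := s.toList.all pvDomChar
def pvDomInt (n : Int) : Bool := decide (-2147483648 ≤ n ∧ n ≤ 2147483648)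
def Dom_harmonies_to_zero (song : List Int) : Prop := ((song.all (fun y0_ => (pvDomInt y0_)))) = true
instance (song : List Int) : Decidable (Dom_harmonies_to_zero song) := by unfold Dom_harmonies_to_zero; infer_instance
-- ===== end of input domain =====

-- B consumes the list in blocks of five via slicing (keep the first two of each block, -1 for the
-- rest of the block) instead of testing i % 5 at every index; alternative decomposition, same cost.

-- ===== PORT A =====
-- 'song[i]' is always in range here (i from range(len(song))), so pyGetD with default 0 is exact.
def harmonies_to_zero (song : List Int) : List Int :=
  (PySem.List.pyRange 0 (song.length : Int) 1).foldl
    (fun result i =>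
      if PySem.Int.mod i 5 = 2 ∨ PySem.Int.mod i 5 = 3 ∨ PySem.Int.mod i 5 = 4 then
        result ++ [(-1 : Int)]
      else
        result ++ [PySem.List.pyGetD song i 0])
    []

-- ===== PORT B =====
-- '[-1] * (len(chunk) - 2)': Python's negative repeat count yields [], matched by Nat truncated subtraction.
def harmonies_to_zero_alt (song : List Int) : List Int :=
  (PySem.List.pyRange 0 (song.length : Int) 5).foldl
    (fun result start =>
      let chunk := PySem.List.slice song (some start) (some (start + 5))
      result ++ PySem.List.slice chunk none (some 2) ++ List.replicate (chunk.length - 2) (-1))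
    []

-- ===== PRECONDITION & SPEC =====
def Spec_harmonies_to_zero (song : List Int) (out : List Int) : Prop := out = harmonies_to_zero_alt song
instance (song : List Int) (out : List Int) : Decidable (Spec_harmonies_to_zero song out) := by unfold Spec_harmonies_to_zero; infer_instance

-- ===== CLAIM (what is proved, stated in full; the proofs are below) =====
def Claim_equal_harmonies_to_zero : Prop := ∀ (song : List Int), Dom_harmonies_to_zero song → Spec_harmonies_to_zero song (harmonies_to_zero song)

-- ===== LEMMAS AND PROOFS =====

-- common characterisation: first two of every block of five kept, the rest replaced by -1
def pure5 : List Int → List Int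
  | [] => []
  | [a] => [a]
  | [a, b] => [a, b]
  | [a, b, _] => [a, b, -1]
  | [a, b, _, _] => [a, b, -1, -1]
  | a :: b :: _ :: _ :: _ :: r => a :: b :: -1 :: -1 :: -1 :: pure5 r

theorem slice_to_two (xs : List Int) : PySem.List.slice xs none (some 2) = xs.take 2 := by
  exact_mod_cast PySem.List.slice_to_natCast xs 2

theorem slice_chunk (xs : List Int) (s : Nat) :
    PySem.List.slice xs (some (s : Int)) (some ((s : Int) + 5)) = (xs.drop s).take 5 := by
  exact_mod_cast PySem.List.slice_natCast_add xs s 5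

theorem pyRange_five_cons (a b : Int) (h : a < b) :
    PySem.List.pyRange a b 5 = a :: PySem.List.pyRange (a + 5) b 5 := by
  rw [PySem.List.pyRange_of_pos a b (by norm_num), PySem.List.pyRange_of_pos (a + 5) b (by norm_num)]
  by_cases h2 : a + 5 < b
  · rw [if_pos h, if_pos h2]
    have hN : ((b - a + 5 - 1) / 5).toNat = ((b - (a + 5) + 5 - 1) / 5).toNat + 1 := by omega
    rw [hN]
    apply List.ext_getElem
    · simp
    · intro i h1 h2'
      cases i with
      | zero => simp
      | succ n =>
        simp only [List.getElem_map, List.getElem_range, List.getElem_cons_succ]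
        push_cast
        ring
  · rw [if_pos h, if_neg h2]
    have hN : ((b - a + 5 - 1) / 5).toNat = 1 := by omega
    rw [hN]
    simp

theorem pyRange_five_nil (a b : Int) (h : b ≤ a) : PySem.List.pyRange a b 5 = [] := by
  rw [PySem.List.pyRange_of_pos a b (by norm_num), if_neg (by omega)]
  simp

theorem foldB_eq (song : List Int) (tail : List Int) :
    ∀ (s : Nat) (acc : List Int), song.drop s = tail →
      (PySem.List.pyRange (s : Int) (song.length : Int) 5).foldl
        (fun result start =>
          let chunk := PySem.List.slice song (some start) (some (start + 5))
          result ++ PySem.List.slice chunk none (some 2) ++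
            List.replicate (chunk.length - 2) (-1)) acc = acc ++ pure5 tail := by
  induction tail using pure5.induct with
  | case1 =>
    intro s acc hd
    have hs : song.length ≤ s := by
      have := congrArg List.length hd
      simp at this
      omega
    rw [pyRange_five_nil _ _ (by exact_mod_cast hs)]
    simp [pure5]
  | case2 a =>
    intro s acc hd
    have hlen : song.length = s + 1 := by
      have := congrArg List.length hd; simp at this; omega
    rw [pyRange_five_cons _ _ (by exact_mod_cast by omega), List.foldl_cons,
      pyRange_five_nil _ _ (by push_cast [hlen]; omega)]
    simp only [List.foldl_nil, slice_chunk, hd]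
    simp [pure5, slice_to_two]
  | case3 a b =>
    intro s acc hd
    have hlen : song.length = s + 2 := by
      have := congrArg List.length hd; simp at this; omega
    rw [pyRange_five_cons _ _ (by exact_mod_cast by omega), List.foldl_cons,
      pyRange_five_nil _ _ (by push_cast [hlen]; omega)]
    simp only [List.foldl_nil, slice_chunk, hd]
    simp [pure5, slice_to_two]
  | case4 a b c =>
    intro s acc hd
    have hlen : song.length = s + 3 := by
      have := congrArg List.length hd; simp at this; omega
    rw [pyRange_five_cons _ _ (by exact_mod_cast by omega), List.foldl_cons,
      pyRange_five_nil _ _ (by push_cast [hlen]; omega)]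
    simp only [List.foldl_nil, slice_chunk, hd]
    simp [pure5, slice_to_two]
  | case5 a b c d =>
    intro s acc hd
    have hlen : song.length = s + 4 := by
      have := congrArg List.length hd; simp at this; omega
    rw [pyRange_five_cons _ _ (by exact_mod_cast by omega), List.foldl_cons,
      pyRange_five_nil _ _ (by push_cast [hlen]; omega)]
    simp only [List.foldl_nil, slice_chunk, hd]
    simp [pure5, slice_to_two, List.replicate]
  | case6 a b c d e r ih =>
    intro s acc hd
    have hs : s < song.length := by
      have := congrArg List.length hd; simp at this; omega
    rw [pyRange_five_cons _ _ (by exact_mod_cast hs), List.foldl_cons]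
    simp only [slice_chunk, hd]
    have hcast : (s : Int) + 5 = ((s + 5 : Nat) : Int) := by push_cast; ring
    rw [hcast, ih (s + 5) _ (by rw [← List.drop_drop, hd]; rfl)]
    simp [pure5, slice_to_two, List.replicate]

theorem b_eq_pure5 (song : List Int) : harmonies_to_zero_alt song = pure5 song := by
  unfold harmonies_to_zero_alt
  have h := foldB_eq song song 0 [] (by simp)
  simpa using h

-- A-side: the fold is a map over indices
def fN (full : List Int) (i : Nat) : Int :=
  if i % 5 = 2 ∨ i % 5 = 3 ∨ i % 5 = 4 then -1 else full.getD i 0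

theorem fN_keep (full : List Int) (i : Nat) (h : i % 5 = 0 ∨ i % 5 = 1) :
    fN full i = full.getD i 0 := by
  unfold fN; rw [if_neg (by omega)]

theorem fN_neg1 (full : List Int) (i : Nat) (h : i % 5 = 2 ∨ i % 5 = 3 ∨ i % 5 = 4) :
    fN full i = -1 := by
  unfold fN; rw [if_pos h]

theorem main5 (song : List Int) :
    ∀ (full : List Int) (k : Nat), k % 5 = 0 →
      (∀ j, full.getD (k + j) 0 = song.getD j 0) →
      (List.range song.length).map (fun j => fN full (k + j)) = pure5 song := by
  induction song using pure5.induct with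
  | case1 => intro full k hk h; simp [pure5]
  | case2 a =>
    intro full k hk h
    rw [show ([a] : List Int).length = 1 from rfl, show List.range 1 = [0] from by decide]
    simp only [List.map_cons, List.map_nil]
    rw [fN_keep _ _ (by omega)]
    simp [pure5]
    simpa using h 0
  | case3 a b =>
    intro full k hk h
    rw [show ([a, b] : List Int).length = 2 from rfl, show List.range 2 = [0, 1] from by decide]
    simp only [List.map_cons, List.map_nil]
    rw [fN_keep _ _ (by omega), fN_keep _ _ (by omega)]
    simp [pure5]
    exact ⟨by simpa using h 0, by simpa using h 1⟩
  | case4 a b c =>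
    intro full k hk h
    rw [show ([a, b, c] : List Int).length = 3 from rfl,
      show List.range 3 = [0, 1, 2] from by decide]
    simp only [List.map_cons, List.map_nil]
    rw [fN_keep _ _ (by omega), fN_keep _ _ (by omega), fN_neg1 _ _ (by omega)]
    simp [pure5]
    exact ⟨by simpa using h 0, by simpa using h 1⟩
  | case5 a b c d =>
    intro full k hk h
    rw [show ([a, b, c, d] : List Int).length = 4 from rfl,
      show List.range 4 = [0, 1, 2, 3] from by decide]
    simp only [List.map_cons, List.map_nil]
    rw [fN_keep _ _ (by omega), fN_keep _ _ (by omega), fN_neg1 _ _ (by omega),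
      fN_neg1 _ _ (by omega)]
    simp [pure5]
    exact ⟨by simpa using h 0, by simpa using h 1⟩
  | case6 a b c d e r ih =>
    intro full k hk h
    have hlen : (a :: b :: c :: d :: e :: r).length = 5 + r.length := by simp; omega
    rw [hlen, List.range_add, List.map_append, List.map_map]
    have h5 : (List.range 5).map (fun j => fN full (k + j)) = [a, b, -1, -1, -1] := by
      rw [show List.range 5 = [0, 1, 2, 3, 4] from by decide]
      simp only [List.map_cons, List.map_nil]
      rw [fN_keep _ _ (by omega), fN_keep _ _ (by omega), fN_neg1 _ _ (by omega),
        fN_neg1 _ _ (by omega), fN_neg1 _ _ (by omega)]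
      simp
      exact ⟨by simpa using h 0, by simpa using h 1⟩
    have htail :
        (List.range r.length).map ((fun j => fN full (k + j)) ∘ (fun j => 5 + j)) = pure5 r := by
      have hr := ih full (k + 5) (by omega) (fun j => by
        have h' := h (5 + j)
        have e1 : k + (5 + j) = k + 5 + j := by omega
        rw [e1] at h'
        rw [h']
        have e2 : 5 + j = j + 1 + 1 + 1 + 1 + 1 := by omega
        rw [e2]
        simp)
      rw [← hr]
      apply List.map_congr_left
      intro j _
      simp only [Function.comp]
      congr 1
      omega
    rw [h5, htail]
    simp [pure5]

theorem a_eq_pure5 (song : List Int) : harmonies_to_zero song = pure5 song := by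
  unfold harmonies_to_zero
  have hfun : (fun (result : List Int) (i : Int) =>
      if PySem.Int.mod i 5 = 2 ∨ PySem.Int.mod i 5 = 3 ∨ PySem.Int.mod i 5 = 4 then
        result ++ [(-1 : Int)]
      else
        result ++ [PySem.List.pyGetD song i 0]) =
      fun result i => result ++
        [if PySem.Int.mod i 5 = 2 ∨ PySem.Int.mod i 5 = 3 ∨ PySem.Int.mod i 5 = 4 then
          (-1 : Int) else PySem.List.pyGetD song i 0] := by
    funext r i; split <;> rfl
  rw [hfun, PySem.List.foldl_append_singleton_eq_map, List.nil_append,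
    PySem.List.pyRange_zero_natCast, List.map_map]
  have hb : ∀ j : Nat,
      ((fun i : Int =>
        if PySem.Int.mod i 5 = 2 ∨ PySem.Int.mod i 5 = 3 ∨ PySem.Int.mod i 5 = 4 then
          (-1 : Int) else PySem.List.pyGetD song i 0) ∘ (fun k : Nat => (k : Int))) j =
        fN song (0 + j) := by
    intro j
    have hcond : (PySem.Int.mod (j : Int) 5 = 2 ∨ PySem.Int.mod (j : Int) 5 = 3 ∨
        PySem.Int.mod (j : Int) 5 = 4) ↔ (j % 5 = 2 ∨ j % 5 = 3 ∨ j % 5 = 4) := by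
      rw [PySem.Int.mod_eq_emod_of_pos (by norm_num)]
      omega
    simp only [Function.comp, fN, hcond, PySem.List.pyGetD_natCast, Nat.zero_add]
  rw [List.map_congr_left (fun j _ => hb j)]
  rw [main5 song song 0 rfl (fun j => by simp)]

-- ===== VERDICT (by name: the statement is the Claim_ definition above) =====
theorem harmonies_to_zero_spec : Claim_equal_harmonies_to_zero := by
  intro song _dom
  unfold Spec_harmonies_to_zero
  rw [a_eq_pure5, b_eq_pure5]
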